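-- pv_equiv track=rewrite | github.com/FelixSchoen/PAUL-2 | src/data_processing/data_pipeline.py | _flush_wait_buffer
-- ===== SOURCE A (Python) =====
-- def _flush_wait_buffer(wait_buffer):
--     tokens = []
--
--     while wait_buffer > 24:
--         tokens.append(1 + (24 - 1))
--         wait_buffer -= 24
--
--     if wait_buffer > 0:
--         tokens.append(1 + (wait_buffer - 1))
--
--     return tokens
-- ===== SOURCE B (Python) =====
-- def _flush_wait_buffer(wait_buffer):
--     if wait_buffer <= 0:
--         return []
--     full, rem = divmod(wait_buffer - 1, 24)
--     tokens = [24] * full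
--     tokens.append(rem + 1)
--     return tokens
-- ===== Notes on version B (the rewrite author's own statement) =====
-- stated objective: simpler
-- what changed: Replaced the while-loop's repeated subtraction with a single closed-form divmod split: full-size tokens followed by the remainder token.
import Mathlib
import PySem

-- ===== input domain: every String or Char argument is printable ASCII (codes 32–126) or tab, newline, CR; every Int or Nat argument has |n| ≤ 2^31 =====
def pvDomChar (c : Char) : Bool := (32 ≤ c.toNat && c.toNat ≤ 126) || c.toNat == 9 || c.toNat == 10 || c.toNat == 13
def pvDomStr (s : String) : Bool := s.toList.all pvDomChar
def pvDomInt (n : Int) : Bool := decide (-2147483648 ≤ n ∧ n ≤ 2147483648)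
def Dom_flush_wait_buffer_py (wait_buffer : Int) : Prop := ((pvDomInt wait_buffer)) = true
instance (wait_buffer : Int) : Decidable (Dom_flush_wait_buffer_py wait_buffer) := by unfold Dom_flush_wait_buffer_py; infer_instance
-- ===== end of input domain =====

-- B replaces A's repeated-subtraction while-loop by a closed-form divmod split (simpler; same O(n/24) output cost).

-- ===== PORT A =====
-- the while-loop, with the growing `tokens` list as accumulator
def flush_wait_buffer_py_loop (tokens : List Int) (wait_buffer : Int) : List Int :=
  if wait_buffer > 24 then
    flush_wait_buffer_py_loop (tokens ++ [1 + (24 - 1)]) (wait_buffer - 24)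
  else if wait_buffer > 0 then tokens ++ [1 + (wait_buffer - 1)]
  else tokens
termination_by wait_buffer.toNat
decreasing_by omega

def flush_wait_buffer_py (wait_buffer : Int) : List Int :=
  flush_wait_buffer_py_loop [] wait_buffer

-- ===== PORT B =====
def flush_wait_buffer_py_alt (wait_buffer : Int) : List Int :=
  if wait_buffer ≤ 0 then []
  else
    let full := PySem.Int.floordiv (wait_buffer - 1) 24
    let rem := PySem.Int.mod (wait_buffer - 1) 24
    List.replicate full.toNat 24 ++ [rem + 1]

-- ===== PRECONDITION & SPEC =====
def Spec_flush_wait_buffer_py (wait_buffer : Int) (out : List Int) : Prop := out = flush_wait_buffer_py_alt wait_buffer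
instance (wait_buffer : Int) (out : List Int) : Decidable (Spec_flush_wait_buffer_py wait_buffer out) := by unfold Spec_flush_wait_buffer_py; infer_instance

-- ===== CLAIM (what is proved, stated in full; the proofs are below) =====
def Claim_equal_flush_wait_buffer_py : Prop := ∀ (wait_buffer : Int), Dom_flush_wait_buffer_py wait_buffer → Spec_flush_wait_buffer_py wait_buffer (flush_wait_buffer_py wait_buffer)

-- ===== LEMMAS AND PROOFS =====

-- invariant of A's loop: it appends B's closed-form split to the accumulator
theorem flush_wait_buffer_py_loop_eq (tokens : List Int) (wait_buffer : Int) :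
    flush_wait_buffer_py_loop tokens wait_buffer = tokens ++ flush_wait_buffer_py_alt wait_buffer := by
  induction tokens, wait_buffer using flush_wait_buffer_py_loop.induct with
  | case1 tokens w hw ih =>
    rw [flush_wait_buffer_py_loop, if_pos hw, ih]
    have h1 : ¬ w ≤ 0 := by omega
    have h2 : ¬ w - 24 ≤ 0 := by omega
    simp only [flush_wait_buffer_py_alt, if_neg h1, if_neg h2]
    rw [PySem.Int.floordiv_eq_ediv_of_pos (by norm_num),
        PySem.Int.floordiv_eq_ediv_of_pos (by norm_num),
        PySem.Int.mod_eq_emod_of_pos (by norm_num),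
        PySem.Int.mod_eq_emod_of_pos (by norm_num)]
    have hq : ((w - 1) / 24).toNat = ((w - 24 - 1) / 24).toNat + 1 := by omega
    have hm : (w - 1) % 24 = (w - 24 - 1) % 24 := by omega
    rw [hq, hm, List.replicate_succ]
    simp
  | case2 tokens w hw hp =>
    rw [flush_wait_buffer_py_loop, if_neg hw, if_pos hp]
    simp only [flush_wait_buffer_py_alt, if_neg (by omega : ¬ w ≤ 0)]
    rw [PySem.Int.floordiv_eq_ediv_of_pos (by norm_num),
        PySem.Int.mod_eq_emod_of_pos (by norm_num)]
    have hq : ((w - 1) / 24).toNat = 0 := by omega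
    have hm : (w - 1) % 24 = w - 1 := by omega
    rw [hq, hm]
    simp
  | case3 tokens w hw hp =>
    rw [flush_wait_buffer_py_loop, if_neg hw, if_neg hp]
    simp [flush_wait_buffer_py_alt, (by omega : w ≤ 0)]

-- ===== VERDICT (by name: the statement is the Claim_ definition above) =====
theorem flush_wait_buffer_py_spec : Claim_equal_flush_wait_buffer_py := by
  intro w _
  unfold Spec_flush_wait_buffer_py flush_wait_buffer_py
  rw [flush_wait_buffer_py_loop_eq]
  simp
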